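-- pv_equiv track=rewrite | github.com/coralisland-git/web-spider-cloud | shws_tx/chainxy/spiders/shws_tx.py | get_value_bulk
-- ===== SOURCE A (Python) =====
-- def get_value_bulk(arg1, arg2, items):
--
-- 	val = ''
--
-- 	index = 0
--
-- 	for ind in range(0, len(items)):
--
-- 		if arg1.lower() in items[ind].lower():
--
-- 			try:
--
-- 				index = ind
--
-- 				break
--
-- 			except:
--
-- 				pass
--
-- 	if arg2 == 'end':
--
-- 		for ind in range(index, len(items)):
--
-- 			val += items[ind] + ' '
--
-- 	else:
--
-- 		for ind in range(index, len(items)):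
--
-- 			if arg2.lower() in items[ind].lower():
--
-- 				try:
--
-- 					break
--
-- 				except:
--
-- 					pass
--
-- 			else :
--
-- 				val += items[ind] + ' '
--
-- 	return val
-- ===== SOURCE B (Python) =====
-- def get_value_bulk(arg1, arg2, items):
--     n = len(items)
--     # suffix DP, right to left: stop[i] = index of the first arg2-marker at or after i
--     # (n if there is none, or if arg2 == 'end' so nothing stops the collection)
--     stop = [n] * (n + 1)
--     if arg2 != 'end':
--         a2 = arg2.lower()
--         for i in range(n - 1, -1, -1):
--             stop[i] = i if a2 in items[i].lower() else stop[i + 1]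
--     # start = first index whose item contains arg1 (0 if none)
--     start = 0
--     a1 = arg1.lower()
--     for i in range(n):
--         if a1 in items[i].lower():
--             start = i
--             break
--     return ''.join(x + ' ' for x in items[start:stop[start]])
-- ===== Notes on version B (the rewrite author's own statement) =====
-- stated objective: faster
-- what changed: Replaces A's forward break-and-accumulate loops with a right-to-left dynamic-programming pass that precomputes, for every index, the stopping boundary stop[i] (first arg2-marker at or after i), then a start lookup and one ''.join over the slice items[start:stop[start]].
import Mathlib
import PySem

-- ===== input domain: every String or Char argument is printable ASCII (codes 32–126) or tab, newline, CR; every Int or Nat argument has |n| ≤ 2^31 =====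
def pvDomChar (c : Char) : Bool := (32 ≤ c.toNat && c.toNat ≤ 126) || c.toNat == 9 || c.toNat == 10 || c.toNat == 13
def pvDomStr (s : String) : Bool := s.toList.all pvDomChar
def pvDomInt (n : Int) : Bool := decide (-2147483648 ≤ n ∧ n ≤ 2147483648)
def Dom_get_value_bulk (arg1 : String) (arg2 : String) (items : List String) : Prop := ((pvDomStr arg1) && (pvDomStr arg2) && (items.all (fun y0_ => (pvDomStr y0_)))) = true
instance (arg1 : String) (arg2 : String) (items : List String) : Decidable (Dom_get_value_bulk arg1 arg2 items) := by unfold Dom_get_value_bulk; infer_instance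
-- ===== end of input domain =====

-- B replaces A's forward break/accumulate loops by a right-to-left DP of stopping boundaries
-- plus one slice/join (avoiding A's repeated string concatenation); proved equal below. (objective: faster, measured)

-- ===== PORT A =====
-- first loop: 'for ind in range(0, len(items)): if a1 in items[ind].lower(): index = ind; break'
-- rendered as recursion over the list carrying the running index ind (items[ind] is the head);
-- returns the final value of 'index' (0 if no iteration broke).
def getA_find (arg1 : String) : List String → Nat → Nat
  | [], _ => 0
  | it :: rest, ind =>
      if PySem.Str.isIn (PySem.Str.lower arg1) (PySem.Str.lower it) then ind
      else getA_find arg1 rest (ind + 1)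

-- 'for ind in range(index, len(items)): val += items[ind] + " "' — iteration over items[index:],
-- i.e. items.drop index, accumulating val.
def getA_end (val : String) : List String → String
  | [] => val
  | it :: rest => getA_end (val ++ it ++ " ") rest

-- the else-branch loop with its break on arg2
def getA_else (arg2 : String) (val : String) : List String → String
  | [] => val
  | it :: rest =>
      if PySem.Str.isIn (PySem.Str.lower arg2) (PySem.Str.lower it) then val
      else getA_else arg2 (val ++ it ++ " ") rest

def get_value_bulk (arg1 : String) (arg2 : String) (items : List String) : String :=
  let index := getA_find arg1 items 0
  if arg2 == "end" then getA_end "" (items.drop index)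
  else getA_else arg2 "" (items.drop index)

-- ===== PORT B =====
-- the reversed-range DP loop 'for i in range(n-1,-1,-1): stop[i] = i if marker else stop[i+1]'
-- fills the stop array from the right; rendered as right-to-left recursion producing
-- [stop[i], …, stop[n]] for the suffix starting at absolute index i (stop[n] = n = i + len).
def getB_stops (arg2 : String) : List String → Nat → List Nat
  | [], i => [i]
  | x :: xs, i =>
      let r := getB_stops arg2 xs (i + 1)
      (if PySem.Str.isIn (PySem.Str.lower arg2) (PySem.Str.lower x) then i else r.headD 0) :: r

-- 'start = 0; for i in range(n): if a1 in items[i].lower(): start = i; break'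
def getB_find (arg1 : String) : List String → Nat → Nat
  | [], _ => 0
  | it :: rest, i =>
      if PySem.Str.isIn (PySem.Str.lower arg1) (PySem.Str.lower it) then i
      else getB_find arg1 rest (i + 1)

def get_value_bulk_alt (arg1 : String) (arg2 : String) (items : List String) : String :=
  let n := items.length
  let stop := if arg2 == "end" then List.replicate (n + 1) n else getB_stops arg2 items 0
  let start := getB_find arg1 items 0
  -- ''.join(x + ' ' for x in items[start:stop[start]])
  PySem.Str.join ""
    ((PySem.List.slice items (some (start : Int)) (some ((stop.getD start n : Nat) : Int))).map
      (fun x => x ++ " "))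

-- ===== PRECONDITION & SPEC =====
def Spec_get_value_bulk (arg1 : String) (arg2 : String) (items : List String) (out : String) : Prop := out = get_value_bulk_alt arg1 arg2 items
instance (arg1 : String) (arg2 : String) (items : List String) (out : String) : Decidable (Spec_get_value_bulk arg1 arg2 items out) := by unfold Spec_get_value_bulk; infer_instance

-- ===== CLAIM (what is proved, stated in full; the proofs are below) =====
def Claim_equal_get_value_bulk : Prop := ∀ (arg1 : String) (arg2 : String) (items : List String), Dom_get_value_bulk arg1 arg2 items → Spec_get_value_bulk arg1 arg2 items (get_value_bulk arg1 arg2 items)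

-- ===== LEMMAS AND PROOFS =====

-- proof-only abbreviations
def pvJw (t : List String) : String := PySem.Str.join "" (t.map (fun x => x ++ " "))

-- first marker index at or after absolute index i in the suffix t (structural form of the DP)
def pvSAt (arg2 : String) : List String → Nat → Nat
  | [], i => i
  | x :: xs, i =>
      if PySem.Str.isIn (PySem.Str.lower arg2) (PySem.Str.lower x) then i else pvSAt arg2 xs (i + 1)

theorem pvJw_nil : pvJw [] = "" := by
  simp [pvJw, PySem.Str.join, PySem.Chars.join, List.intercalate]

theorem pvJw_cons (x : String) (xs : List String) : pvJw (x :: xs) = x ++ " " ++ pvJw xs := by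
  cases xs with
  | nil =>
      apply String.toList_injective
      simp [pvJw, PySem.Str.join, PySem.Chars.join, List.intercalate]
  | cons y ys =>
      apply String.toList_injective
      simp [pvJw, PySem.Str.join, PySem.Chars.join, List.intercalate]

theorem getB_find_eq_getA_find (arg1 : String) (t : List String) (i : Nat) :
    getB_find arg1 t i = getA_find arg1 t i := by
  induction t generalizing i with
  | nil => rfl
  | cons x xs ih => simp [getB_find, getA_find, ih]

theorem getA_find_le (arg1 : String) (t : List String) (i : Nat) :
    getA_find arg1 t i ≤ i + t.length := by
  induction t generalizing i with
  | nil => simp [getA_find]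
  | cons x xs ih =>
      simp only [getA_find, List.length_cons]
      split
      · omega
      · have := ih (i + 1); omega

theorem getA_end_acc (v : String) (t : List String) :
    getA_end v t = v ++ getA_end "" t := by
  induction t generalizing v with
  | nil => simp [getA_end]
  | cons x xs ih =>
      simp only [getA_end]
      rw [ih (v ++ x ++ " "), ih ("" ++ x ++ " ")]
      simp [String.append_assoc]

theorem getA_else_acc (arg2 v : String) (t : List String) :
    getA_else arg2 v t = v ++ getA_else arg2 "" t := by
  induction t generalizing v with
  | nil => simp [getA_else]
  | cons x xs ih =>
      simp only [getA_else]
      split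
      · simp
      · rw [ih (v ++ x ++ " "), ih ("" ++ x ++ " ")]
        simp [String.append_assoc]

theorem pvJw_eq_getA_end (t : List String) : pvJw t = getA_end "" t := by
  induction t with
  | nil => simp [pvJw_nil, getA_end]
  | cons x xs ih =>
      rw [pvJw_cons, ih]
      simp only [getA_end]
      rw [getA_end_acc ("" ++ x ++ " ") xs]
      simp [String.append_assoc]

theorem getB_stops_headD (arg2 : String) (t : List String) (i d : Nat) :
    (getB_stops arg2 t i).headD d = pvSAt arg2 t i := by
  cases t with
  | nil => rfl
  | cons x xs =>
      simp only [getB_stops, List.headD_cons, pvSAt]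
      split
      · rfl
      · induction xs generalizing i with
        | nil => rfl
        | cons y ys ih =>
            simp only [getB_stops, List.headD_cons, pvSAt]
            split
            · rfl
            · exact ih (i + 1)

theorem pvSAt_ge (arg2 : String) (t : List String) (i : Nat) : i ≤ pvSAt arg2 t i := by
  induction t generalizing i with
  | nil => simp [pvSAt]
  | cons x xs ih =>
      simp only [pvSAt]
      split
      · exact le_rfl
      · have := ih (i + 1); omega

theorem pvSAt_take_eq_getA_else (arg2 : String) (t : List String) (i : Nat) :
    pvJw (t.take (pvSAt arg2 t i - i)) = getA_else arg2 "" t := by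
  induction t generalizing i with
  | nil => simp [pvSAt, pvJw_nil, getA_else]
  | cons x xs ih =>
      by_cases hc : PySem.Str.isIn (PySem.Str.lower arg2) (PySem.Str.lower x) = true
      · simp only [pvSAt, getA_else, if_pos hc]
        simp [pvJw_nil]
      · have hge : i + 1 ≤ pvSAt arg2 xs (i + 1) := pvSAt_ge arg2 xs (i + 1)
        have htake : pvSAt arg2 (x :: xs) i - i = (pvSAt arg2 xs (i + 1) - (i + 1)) + 1 := by
          simp only [pvSAt, if_neg hc]; omega
        rw [htake, List.take_succ_cons, pvJw_cons, ih (i + 1)]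
        simp only [getA_else, if_neg hc]
        rw [getA_else_acc arg2 ("" ++ x ++ " ") xs]
        simp [String.append_assoc]

theorem getB_stops_getD (arg2 : String) (t : List String) (i : Nat) (d : Nat) :
    ∀ j, j ≤ t.length → (getB_stops arg2 t i).getD j d = pvSAt arg2 (t.drop j) (i + j) := by
  induction t generalizing i with
  | nil =>
      intro j hj
      have : j = 0 := by simpa using hj
      subst this
      simp [getB_stops, pvSAt]
  | cons x xs ih =>
      intro j hj
      cases j with
      | zero =>
          simp only [getB_stops, List.getD_cons_zero, List.drop_zero, Nat.add_zero, pvSAt]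
          split
          · rfl
          · exact getB_stops_headD arg2 xs (i + 1) 0
      | succ k =>
          simp only [getB_stops, List.getD_cons_succ, List.drop_succ_cons]
          have := ih (i + 1) k (by simpa using hj)
          rw [this]
          congr 1
          omega

theorem replicate_getD (n m k : Nat) : (List.replicate m n).getD k n = n := by
  rcases lt_or_ge k m with h | h
  · simp [List.getD, h]
  · rw [List.getD, List.getElem?_eq_none (by simpa using h)]
    rfl

-- ===== VERDICT (by name: the statement is the Claim_ definition above) =====
theorem get_value_bulk_spec : Claim_equal_get_value_bulk := by
  intro arg1 arg2 items _
  unfold Spec_get_value_bulk get_value_bulk get_value_bulk_alt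
  rw [getB_find_eq_getA_find]
  set start := getA_find arg1 items 0 with hstart
  have hsle : start ≤ items.length := by simpa using getA_find_le arg1 items 0
  by_cases he : (arg2 == "end") = true
  · simp only [he, if_true]
    rw [replicate_getD items.length (items.length + 1) start]
    rw [PySem.List.slice_natCast]
    rw [List.take_of_length_le (by simp)]
    exact (pvJw_eq_getA_end (items.drop start)).symm
  · simp only [he, Bool.false_eq_true, if_false]
    rw [getB_stops_getD arg2 items 0 items.length start hsle]
    rw [PySem.List.slice_natCast]
    simp only [Nat.zero_add]
    have := pvSAt_take_eq_getA_else arg2 (items.drop start) start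
    rw [← this]
    simp [pvJw]
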